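-- pv_equiv track=rewrite | github.com/vexown/wave_rover_LoRa | Tools/lora_encoder.py | _lfsr_next_byte
-- ===== SOURCE A (Python) =====
-- def _lfsr_next_byte(lfsr: list[int]) -> tuple[int, list[int]]:
--     """
--     Advance a 9-bit LFSR (x⁹+x⁵+1) by 8 steps and return one whitening byte.
--     State list is [X8, X7, …, X0]; X0 is the output bit.
--     Returns (whitening_byte, updated_lfsr).
--     """
--     w = 0
--     for bit_pos in range(8):
--         out_bit   = lfsr[8]                    # X0 is output
--         w        |= out_bit << (7 - bit_pos)   # pack MSB-first into byte
--         feedback  = lfsr[8] ^ lfsr[4]          # taps: X0 ⊕ X4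
--         lfsr      = [feedback] + lfsr[:8]       # shift right, insert feedback
--     return w, lfsr
-- ===== SOURCE B (Python) =====
-- def _lfsr_next_byte(lfsr: list[int]) -> tuple[int, list[int]]:
--     # Closed form: the 8-step LFSR loop unrolled into direct expressions over the
--     # nine original state elements (feedback chains grouped as bit ^ (earlier feedback)).
--     a0, a1, a2, a3, a4, a5, a6, a7, a8 = lfsr[:9]
--     w = (a8 << 7) | (a7 << 6) | (a6 << 5) | (a5 << 4) | (a4 << 3) | (a3 << 2) | (a2 << 1) | a1
--     state = [a1 ^ (a6 ^ a2), a2 ^ (a7 ^ a3), a3 ^ (a8 ^ a4), a4 ^ a0,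
--              a5 ^ a1, a6 ^ a2, a7 ^ a3, a8 ^ a4, a0]
--     return w, state
-- ===== Notes on version B (the rewrite author's own statement) =====
-- stated objective: alternative
-- what changed: The 8-iteration LFSR loop (each step rebuilding the 9-element state list) is replaced by closed-form expressions: the whitening byte and the new state are computed directly from the nine original elements with no loop and no intermediate states.
-- outside the precondition, e.g. on _lfsr_next_byte([8]): A raises IndexError, B raises ValueError
import Mathlib
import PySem

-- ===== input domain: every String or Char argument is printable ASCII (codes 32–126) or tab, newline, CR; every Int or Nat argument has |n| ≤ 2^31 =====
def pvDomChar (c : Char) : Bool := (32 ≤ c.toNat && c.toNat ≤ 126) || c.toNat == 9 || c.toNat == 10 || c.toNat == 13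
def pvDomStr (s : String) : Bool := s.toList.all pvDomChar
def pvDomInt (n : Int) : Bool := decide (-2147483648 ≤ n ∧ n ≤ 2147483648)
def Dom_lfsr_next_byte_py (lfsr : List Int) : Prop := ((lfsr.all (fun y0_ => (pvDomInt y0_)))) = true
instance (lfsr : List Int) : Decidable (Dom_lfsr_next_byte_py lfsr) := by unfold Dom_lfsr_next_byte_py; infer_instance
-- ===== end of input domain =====

-- B replaces A's 8-iteration LFSR loop by the loop fully unrolled into closed-form
-- expressions over the nine original state elements (objective: alternative).

-- ===== PORT A =====
-- one iteration of A's loop body; the folded state is (w, lfsr)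
def lfsrAStep (st : Int × List Int) (bit_pos : Int) : Int × List Int :=
  let w := st.1
  let l := st.2
  let out_bit := PySem.List.pyGetD l 8 0                       -- lfsr[8]; in range under Pre_
  let w' := PySem.Int.bor w (out_bit <<< (7 - bit_pos).toNat)  -- w |= out_bit << (7 - bit_pos)
  let feedback := PySem.Int.bxor (PySem.List.pyGetD l 8 0) (PySem.List.pyGetD l 4 0)
  (w', feedback :: PySem.List.slice l none (some 8))           -- [feedback] + lfsr[:8]

def lfsr_next_byte_py (lfsr : List Int) : Int × List Int :=
  (PySem.List.pyRange 0 8 1).foldl lfsrAStep (0, lfsr)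

-- ===== PORT B =====
def lfsr_next_byte_py_alt (lfsr : List Int) : Int × List Int :=
  match PySem.List.slice lfsr none (some 9) with               -- a0,…,a8 = lfsr[:9]
  | [a0, a1, a2, a3, a4, a5, a6, a7, a8] =>
    let w := PySem.Int.bor (PySem.Int.bor (PySem.Int.bor (PySem.Int.bor (PySem.Int.bor
             (PySem.Int.bor (PySem.Int.bor (a8 <<< (7:Nat)) (a7 <<< (6:Nat))) (a6 <<< (5:Nat))) (a5 <<< (4:Nat)))
             (a4 <<< (3:Nat))) (a3 <<< (2:Nat))) (a2 <<< (1:Nat))) a1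
    let state := [PySem.Int.bxor a1 (PySem.Int.bxor a6 a2), PySem.Int.bxor a2 (PySem.Int.bxor a7 a3),
                  PySem.Int.bxor a3 (PySem.Int.bxor a8 a4), PySem.Int.bxor a4 a0,
                  PySem.Int.bxor a5 a1, PySem.Int.bxor a6 a2, PySem.Int.bxor a7 a3,
                  PySem.Int.bxor a8 a4, a0]
    (w, state)
  | _ => (0, [])                                               -- unpacking fails (ValueError) outside Pre_

-- ===== PRECONDITION & SPEC =====
-- A raises IndexError on lfsr[8] when the list has fewer than 9 elements.
def Pre_lfsr_next_byte_py (lfsr : List Int) : Prop := 9 ≤ lfsr.length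
instance (lfsr : List Int) : Decidable (Pre_lfsr_next_byte_py lfsr) := by unfold Pre_lfsr_next_byte_py; infer_instance
def pvWitness_lfsr_next_byte_py : List Int := [1, 0, 1, 1, 0, 0, 1, 0, 1]

def Spec_lfsr_next_byte_py (lfsr : List Int) (out : Int × List Int) : Prop := out = lfsr_next_byte_py_alt lfsr
instance (lfsr : List Int) (out : Int × List Int) : Decidable (Spec_lfsr_next_byte_py lfsr out) := by unfold Spec_lfsr_next_byte_py; infer_instance

-- ===== CLAIM (what is proved, stated in full; the proofs are below) =====
def Claim_equal_lfsr_next_byte_py : Prop := ∀ (lfsr : List Int), Dom_lfsr_next_byte_py lfsr → Pre_lfsr_next_byte_py lfsr → Spec_lfsr_next_byte_py lfsr (lfsr_next_byte_py lfsr)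

-- ===== LEMMAS AND PROOFS =====

-- one step of A's fold on a list with at least nine explicit elements
theorem lfsrAStep_cons (w b0 b1 b2 b3 b4 b5 b6 b7 b8 : Int) (rest : List Int) (k : Int) :
    lfsrAStep (w, b0::b1::b2::b3::b4::b5::b6::b7::b8::rest) k
      = (PySem.Int.bor w (b8 <<< (7 - k).toNat),
         (PySem.Int.bxor b8 b4)::[b0,b1,b2,b3,b4,b5,b6,b7]) := by
  rw [lfsrAStep]
  rw [PySem.List.slice_to _ (by norm_num)]
  rw [PySem.List.pyGetD_ofNat' (k := 8)]
  rw [PySem.List.pyGetD_ofNat' (k := 4)]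
  rfl

theorem bor_zero_left (a : Int) : PySem.Int.bor 0 a = a := by
  rw [PySem.Int.bor_comm, PySem.Int.bor_zero]

-- ===== VERDICT (by name: the statement is the Claim_ definition above) =====
theorem lfsr_next_byte_py_spec : Claim_equal_lfsr_next_byte_py := by
  intro lfsr _ hpre
  unfold Pre_lfsr_next_byte_py at hpre
  obtain ⟨a0, a1, a2, a3, a4, a5, a6, a7, a8, rest, rfl⟩ :
      ∃ a0 a1 a2 a3 a4 a5 a6 a7 a8 rest,
        lfsr = a0 :: a1 :: a2 :: a3 :: a4 :: a5 :: a6 :: a7 :: a8 :: rest := by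
    match lfsr, hpre with
    | a0 :: a1 :: a2 :: a3 :: a4 :: a5 :: a6 :: a7 :: a8 :: rest, _ =>
      exact ⟨a0, a1, a2, a3, a4, a5, a6, a7, a8, rest, rfl⟩
  unfold Spec_lfsr_next_byte_py
  have hr : PySem.List.pyRange 0 8 1 = [0,1,2,3,4,5,6,7] := by decide
  rw [lfsr_next_byte_py, hr]
  rw [List.foldl, lfsrAStep_cons, List.foldl, lfsrAStep_cons, List.foldl, lfsrAStep_cons,
      List.foldl, lfsrAStep_cons, List.foldl, lfsrAStep_cons, List.foldl, lfsrAStep_cons,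
      List.foldl, lfsrAStep_cons, List.foldl, lfsrAStep_cons, List.foldl]
  rw [lfsr_next_byte_py_alt]
  rw [PySem.List.slice_to _ (by norm_num)]
  rw [bor_zero_left]
  have htake : List.take (Int.toNat 9) (a0 :: a1 :: a2 :: a3 :: a4 :: a5 :: a6 :: a7 :: a8 :: rest)
      = [a0, a1, a2, a3, a4, a5, a6, a7, a8] := rfl
  rw [htake]
  norm_num [Int.shiftLeft_zero]
  rfl
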